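-- pv_equiv track=rewrite | github.com/sryimlamer/duk | denis (2).py | checking_win_lose
-- ===== SOURCE A (Python) =====
-- def checking_win_lose(board1, board2, k):
--     """Method for checking win-loss"""
--     count_first = 1
--     """check horizontal for p1"""
--     for i, x in enumerate(board1):
--         for j, y in enumerate(board1[i][:-1]):
--             if board1[i][j] == 'X' and board1[i][j + 1] == 'X':
--                 count_first += 1
--                 if count_first == k:
--                     return 1, "Player 1 win. The end."
--     """check vertical for p1"""
--     count_first = 1
--     for i, x in enumerate(board1[:-1]):
--         for j, y in enumerate(board1[i]):
--             if board1[i][j] == 'X' and board1[i+1][j] == 'X':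
--                 count_first += 1
--                 if count_first == k:
--                     return 1, "Player 1 win. The end."
--     """check horizontal for p2"""
--     count_second = 1
--     for i, x in enumerate(board2):
--         for j, y in enumerate(board2[i][:-1]):
--             if board2[i][j] == 'O' and board2[i][j + 1] == 'O':
--                 count_second += 1
--                 if count_second == k:
--                     return 2, "Player 2 win. The end."
--
--     """check vertical for p2"""
--     count_second = 1
--     for i, x in enumerate(board2[:-1]):
--         for j, y in enumerate(board2[i]):
--             if board2[i][j] == 'O' and board2[i+1][j] == 'O':
--                 count_second += 1
--                 if count_second == k:
--                     return 2, "Player 2 win. The end."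
--     return None, ""
-- ===== SOURCE B (Python) =====
-- def checking_win_lose(board1, board2, k):
--     """Win check via the run-length identity: adjacent-pair count = symbol count - run count,
--     applied to the rows and to explicitly materialised columns."""
--     def line_pairs(line, s):
--         cells = runs = 0
--         prev = None
--         for c in line:
--             if c == s:
--                 cells += 1
--                 if prev != s:
--                     runs += 1
--             prev = c
--         return cells - runs
--
--     def columns(board):
--         width = max((len(r) for r in board), default=0)
--         return [[row[j] for row in board if j < len(row)] for j in range(width)]
--
--     def wins(board, s):
--         return k >= 2 and (sum(line_pairs(r, s) for r in board) >= k - 1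
--                            or sum(line_pairs(c, s) for c in columns(board)) >= k - 1)
--
--     if wins(board1, 'X'):
--         return 1, "Player 1 win. The end."
--     if wins(board2, 'O'):
--         return 2, "Player 2 win. The end."
--     return None, ""
-- ===== Notes on version B (the rewrite author's own statement) =====
-- stated objective: alternative
-- what changed: Replaces A's four index-threaded early-returning counter scans by materialising the column lists once and evaluating each line with the run-length identity (adjacent pairs = symbol count - run count), compared once against k-1.
import Mathlib
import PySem

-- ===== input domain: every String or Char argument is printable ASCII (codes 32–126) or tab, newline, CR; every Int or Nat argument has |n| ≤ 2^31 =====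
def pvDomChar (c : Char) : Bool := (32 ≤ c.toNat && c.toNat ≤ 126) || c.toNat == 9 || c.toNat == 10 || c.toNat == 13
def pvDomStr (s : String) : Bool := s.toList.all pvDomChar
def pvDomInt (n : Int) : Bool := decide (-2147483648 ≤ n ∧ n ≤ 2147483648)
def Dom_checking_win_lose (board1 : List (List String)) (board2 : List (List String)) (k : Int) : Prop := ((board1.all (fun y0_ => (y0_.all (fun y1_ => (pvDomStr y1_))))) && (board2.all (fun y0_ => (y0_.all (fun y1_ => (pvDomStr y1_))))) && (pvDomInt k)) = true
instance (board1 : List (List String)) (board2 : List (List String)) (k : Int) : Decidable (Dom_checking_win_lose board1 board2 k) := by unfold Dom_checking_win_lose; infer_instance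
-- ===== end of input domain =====

-- B materialises the column lists and scores each line by the run-length identity
-- (adjacent pairs = symbol count - run count) instead of A's four early-returning
-- counter scans (objective: alternative).

-- ===== PORT A =====
-- horizontal inner loop: walk the row pairwise, threading the counter; none = win reached
def hScanRow (row : List String) (sym : String) (k : Int) (c : Int) : Option Int :=
  match row with
  | [] => some c
  | [_] => some c
  | a :: b :: t =>
      if a = sym ∧ b = sym then
        if c + 1 = k then none else hScanRow (b :: t) sym k (c + 1)
      else hScanRow (b :: t) sym k c

def hScan (board : List (List String)) (sym : String) (k : Int) (c : Int) : Option Int :=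
  match board with
  | [] => some c
  | r :: rest =>
      match hScanRow r sym k c with
      | none => none
      | some c' => hScan rest sym k c'

-- vertical inner loop: j walks row i (r1) while the corresponding cell of row i+1 (r2) is
-- taken by walking r2 in step; the (a :: _, []) branch with a = sym is Python's IndexError,
-- excluded by Pre_checking_win_lose
def vScanRow (r1 : List String) (r2 : List String) (sym : String) (k : Int) (c : Int) : Option Int :=
  match r1, r2 with
  | [], _ => some c
  | a :: t1, [] => if a = sym then some c else vScanRow t1 [] sym k c
  | a :: t1, b :: t2 =>
      if a = sym ∧ b = sym then
        if c + 1 = k then none else vScanRow t1 t2 sym k (c + 1)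
      else vScanRow t1 t2 sym k c

def vScan (board : List (List String)) (sym : String) (k : Int) (c : Int) : Option Int :=
  match board with
  | [] => some c
  | [_] => some c
  | r1 :: r2 :: rest =>
      match vScanRow r1 r2 sym k c with
      | none => none
      | some c' => vScan (r2 :: rest) sym k c'

def checking_win_lose (board1 : List (List String)) (board2 : List (List String)) (k : Int) : Option Int × String :=
  match hScan board1 "X" k 1 with
  | none => (some 1, "Player 1 win. The end.")
  | some _ =>
    match vScan board1 "X" k 1 with
    | none => (some 1, "Player 1 win. The end.")
    | some _ =>
      match hScan board2 "O" k 1 with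
      | none => (some 2, "Player 2 win. The end.")
      | some _ =>
        match vScan board2 "O" k 1 with
        | none => (some 2, "Player 2 win. The end.")
        | some _ => (none, "")

-- ===== PORT B =====
-- line_pairs: one forward pass tracking (cells, runs, prev); returns cells - runs
def lineLoop (s : String) (line : List String) (prev : Option String) (cells runs : Int) : Int × Int :=
  match line with
  | [] => (cells, runs)
  | c :: t =>
      if c = s then
        lineLoop s t (some c) (cells + 1) (if prev ≠ some s then runs + 1 else runs)
      else lineLoop s t (some c) cells runs

def linePairs (line : List String) (s : String) : Int :=
  (lineLoop s line none 0 0).1 - (lineLoop s line none 0 0).2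

-- column j: [row[j] for row in board if j < len(row)]
def colj (board : List (List String)) (j : Nat) : List String :=
  board.filterMap (fun row => if j < row.length then row[j]? else none)

-- width = max((len(r) for r in board), default=0)
def widthOf (board : List (List String)) : Nat :=
  (board.map List.length).foldl max 0

def colsOf (board : List (List String)) : List (List String) :=
  (List.range (widthOf board)).map (colj board)

def winsB (board : List (List String)) (s : String) (k : Int) : Bool :=
  decide (2 ≤ k) &&
    (decide ((board.map (fun r => linePairs r s)).sum ≥ k - 1) ||
     decide (((colsOf board).map (fun c => linePairs c s)).sum ≥ k - 1))

def checking_win_lose_alt (board1 : List (List String)) (board2 : List (List String)) (k : Int) : Option Int × String :=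
  if winsB board1 "X" k then (some 1, "Player 1 win. The end.")
  else if winsB board2 "O" k then (some 2, "Player 2 win. The end.")
  else (none, "")

-- ===== PRECONDITION & SPEC =====
-- Pre_ excludes boards in which a player-symbol cell sits above a missing cell of the next
-- (shorter) row: on such boards A's vertical scan may raise IndexError (it reaches
-- board[i+1][j] with board[i][j] the symbol and j out of range) unless an earlier win
-- returns first, while B's column lists always give a value.
def vertSafe (board : List (List String)) (sym : String) : Prop :=
  ∀ p ∈ board.zip board.tail, ∀ x ∈ p.1.drop p.2.length, x ≠ sym

def Pre_checking_win_lose (board1 : List (List String)) (board2 : List (List String)) (k : Int) : Prop :=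
  vertSafe board1 "X" ∧ vertSafe board2 "O"

instance (board1 : List (List String)) (board2 : List (List String)) (k : Int) : Decidable (Pre_checking_win_lose board1 board2 k) := by
  unfold Pre_checking_win_lose vertSafe; infer_instance

def pvWitness_checking_win_lose : List (List String) × List (List String) × Int :=
  ([["X", "X"], ["O", "X"]], [["O"], ["O"]], 3)

def Spec_checking_win_lose (board1 : List (List String)) (board2 : List (List String)) (k : Int) (out : Option Int × String) : Prop := out = checking_win_lose_alt board1 board2 k
instance (board1 : List (List String)) (board2 : List (List String)) (k : Int) (out : Option Int × String) : Decidable (Spec_checking_win_lose board1 board2 k out) := by unfold Spec_checking_win_lose; infer_instance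

-- ===== CLAIM (what is proved, stated in full; the proofs are below) =====
def Claim_equal_checking_win_lose : Prop := ∀ (board1 : List (List String)) (board2 : List (List String)) (k : Int), Dom_checking_win_lose board1 board2 k → Pre_checking_win_lose board1 board2 k → Spec_checking_win_lose board1 board2 k (checking_win_lose board1 board2 k)

-- ===== LEMMAS AND PROOFS =====

def pairB (sym : String) (p : String × String) : Bool := p.1 == sym && p.2 == sym

-- Nat-level adjacent-pair count of a single line
def zp (s : String) (l : List String) : Nat := (l.zip l.tail).countP (pairB s)

-- per-row horizontal pair count, as an Int
def cntH (row : List String) (sym : String) : Int := ((zp sym row : Nat) : Int)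

def hPairs (board : List (List String)) (sym : String) : Int :=
  (((board.map (fun row => (row.zip row.tail).countP (pairB sym))).sum : Nat) : Int)

def cntV (r1 r2 : List String) (sym : String) : Int :=
  (((r1.zip r2).countP (pairB sym) : Nat) : Int)

def vPairs (board : List (List String)) (sym : String) : Int :=
  ((((board.zip board.tail).map (fun p => (p.1.zip p.2).countP (pairB sym))).sum : Nat) : Int)

theorem cntH_nonneg (row : List String) (sym : String) : 0 ≤ cntH row sym :=
  Int.natCast_nonneg _

theorem hPairs_nonneg (board : List (List String)) (sym : String) : 0 ≤ hPairs board sym :=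
  Int.natCast_nonneg _

theorem cntV_nonneg (r1 r2 : List String) (sym : String) : 0 ≤ cntV r1 r2 sym :=
  Int.natCast_nonneg _

theorem vPairs_nonneg (board : List (List String)) (sym : String) : 0 ≤ vPairs board sym :=
  Int.natCast_nonneg _

theorem pairB_true {sym a b : String} (h : a = sym ∧ b = sym) : pairB sym (a, b) = true := by
  simp [pairB, h.1, h.2]

theorem pairB_false {sym a b : String} (h : ¬(a = sym ∧ b = sym)) : pairB sym (a, b) = false := by
  simp [pairB]; intro h1 h2; exact absurd ⟨h1, h2⟩ h

-- ---- characterisation of A's scans ----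

theorem hScanRow_eq (sym : String) (k : Int) :
    ∀ (row : List String) (c : Int),
      hScanRow row sym k c =
        if c < k ∧ k ≤ c + cntH row sym then none else some (c + cntH row sym) := by
  intro row
  induction row with
  | nil =>
    intro c
    rw [hScanRow, if_neg (by simp [cntH, zp]; try omega)]
    simp [cntH, zp]
  | cons a t ih =>
    intro c
    cases t with
    | nil =>
      rw [hScanRow, if_neg (by simp [cntH, zp]; try omega)]
      simp [cntH, zp]
    | cons b t' =>
      have hcnt : cntH (a :: b :: t') sym =
          (if a = sym ∧ b = sym then 1 else 0) + cntH (b :: t') sym := by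
        by_cases hab : a = sym ∧ b = sym
        · simp only [cntH, zp, List.tail_cons, List.zip_cons_cons, List.countP_cons,
            pairB_true hab, if_pos hab]
          push_cast
          ring
        · simp only [cntH, zp, List.tail_cons, List.zip_cons_cons, List.countP_cons,
            pairB_false hab, if_neg hab]
          push_cast
          ring
      have hnn := cntH_nonneg (b :: t') sym
      rw [hScanRow, hcnt]
      by_cases hab : a = sym ∧ b = sym
      · rw [if_pos hab, if_pos hab]
        by_cases hk : c + 1 = k
        · rw [if_pos hk, if_pos (by omega)]
        · rw [if_neg hk, ih (c + 1)]
          by_cases h' : c + 1 < k ∧ k ≤ c + 1 + cntH (b :: t') sym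
          · rw [if_pos h', if_pos (by omega)]
          · rw [if_neg h', if_neg (by omega)]
            congr 1
            omega
      · rw [if_neg hab, if_neg hab, ih c, zero_add]

theorem hScan_eq (sym : String) (k : Int) :
    ∀ (board : List (List String)) (c : Int),
      hScan board sym k c =
        if c < k ∧ k ≤ c + hPairs board sym then none else some (c + hPairs board sym) := by
  intro board
  induction board with
  | nil =>
    intro c
    rw [hScan, if_neg (by simp [hPairs]; try omega)]
    simp [hPairs]
  | cons r rest ih =>
    intro c
    have hsum : hPairs (r :: rest) sym = cntH r sym + hPairs rest sym := by
      simp only [hPairs, cntH, zp, List.map_cons, List.sum_cons]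
      push_cast
      ring
    have h1 := cntH_nonneg r sym
    have h2 := hPairs_nonneg rest sym
    rw [hScan, hScanRow_eq, hsum]
    by_cases h : c < k ∧ k ≤ c + cntH r sym
    · rw [if_pos h, if_pos (by omega)]
    · rw [if_neg h]
      show hScan rest sym k (c + cntH r sym) =
        if c < k ∧ k ≤ c + (cntH r sym + hPairs rest sym) then none
        else some (c + (cntH r sym + hPairs rest sym))
      rw [ih]
      by_cases h' : c + cntH r sym < k ∧ k ≤ c + cntH r sym + hPairs rest sym
      · rw [if_pos h', if_pos (by omega)]
      · rw [if_neg h', if_neg (by omega)]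
        congr 1
        omega

theorem vScanRow_eq (sym : String) (k : Int) :
    ∀ (r1 r2 : List String) (c : Int),
      (∀ x ∈ r1.drop r2.length, x ≠ sym) →
      vScanRow r1 r2 sym k c =
        if c < k ∧ k ≤ c + cntV r1 r2 sym then none else some (c + cntV r1 r2 sym) := by
  intro r1
  induction r1 with
  | nil =>
    intro r2 c _
    rw [vScanRow, if_neg (by simp [cntV]; try omega)]
    simp [cntV]
  | cons a t1 ih =>
    intro r2 c hsafe
    cases r2 with
    | nil =>
      have ha : ¬(a = sym) := hsafe a (by simp)
      have ht : ∀ x ∈ t1.drop ([] : List String).length, x ≠ sym := by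
        intro x hx
        exact hsafe x (by simp at hx ⊢; exact Or.inr hx)
      rw [vScanRow, if_neg ha, ih [] c ht]
      simp [cntV]
    | cons b t2 =>
      have ht : ∀ x ∈ t1.drop t2.length, x ≠ sym := by
        intro x hx
        exact hsafe x (by simpa using hx)
      have hcnt : cntV (a :: t1) (b :: t2) sym =
          (if a = sym ∧ b = sym then 1 else 0) + cntV t1 t2 sym := by
        by_cases hab : a = sym ∧ b = sym
        · simp only [cntV, List.zip_cons_cons, List.countP_cons, pairB_true hab, if_pos hab]
          push_cast
          ring
        · simp only [cntV, List.zip_cons_cons, List.countP_cons, pairB_false hab, if_neg hab]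
          push_cast
          ring
      have hnn := cntV_nonneg t1 t2 sym
      rw [vScanRow, hcnt]
      by_cases hab : a = sym ∧ b = sym
      · rw [if_pos hab, if_pos hab]
        by_cases hk : c + 1 = k
        · rw [if_pos hk, if_pos (by omega)]
        · rw [if_neg hk, ih t2 (c + 1) ht]
          by_cases h' : c + 1 < k ∧ k ≤ c + 1 + cntV t1 t2 sym
          · rw [if_pos h', if_pos (by omega)]
          · rw [if_neg h', if_neg (by omega)]
            congr 1
            omega
      · rw [if_neg hab, if_neg hab, ih t2 c ht, zero_add]

theorem vScan_eq (sym : String) (k : Int) :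
    ∀ (board : List (List String)) (c : Int),
      vertSafe board sym →
      vScan board sym k c =
        if c < k ∧ k ≤ c + vPairs board sym then none else some (c + vPairs board sym) := by
  intro board
  induction board with
  | nil =>
    intro c _
    rw [vScan, if_neg (by simp [vPairs]; try omega)]
    simp [vPairs]
  | cons r1 rest ih =>
    intro c hsafe
    cases rest with
    | nil =>
      rw [vScan, if_neg (by simp [vPairs]; try omega)]
      simp [vPairs]
    | cons r2 rest' =>
      have hpair : ∀ x ∈ r1.drop r2.length, x ≠ sym :=
        hsafe (r1, r2) (by simp)
      have htail : vertSafe (r2 :: rest') sym := by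
        intro p hp
        exact hsafe p (by simp at hp ⊢; exact Or.inr hp)
      have hsum : vPairs (r1 :: r2 :: rest') sym = cntV r1 r2 sym + vPairs (r2 :: rest') sym := by
        simp only [vPairs, cntV, List.tail_cons, List.zip_cons_cons, List.map_cons, List.sum_cons]
        push_cast
        ring
      have h1 := cntV_nonneg r1 r2 sym
      have h2 := vPairs_nonneg (r2 :: rest') sym
      rw [vScan, vScanRow_eq sym k r1 r2 c hpair, hsum]
      by_cases h : c < k ∧ k ≤ c + cntV r1 r2 sym
      · rw [if_pos h, if_pos (by omega)]
      · rw [if_neg h]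
        show vScan (r2 :: rest') sym k (c + cntV r1 r2 sym) =
          if c < k ∧ k ≤ c + (cntV r1 r2 sym + vPairs (r2 :: rest') sym) then none
          else some (c + (cntV r1 r2 sym + vPairs (r2 :: rest') sym))
        rw [ih (c + cntV r1 r2 sym) htail]
        by_cases h' : c + cntV r1 r2 sym < k ∧ k ≤ c + cntV r1 r2 sym + vPairs (r2 :: rest') sym
        · rw [if_pos h', if_pos (by omega)]
        · rw [if_neg h', if_neg (by omega)]
          congr 1
          omega

-- ---- characterisation of B's line score: cells - runs = adjacent pairs ----

-- symbol count of a line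
def cnt (s : String) (l : List String) : Nat := l.countP (fun x => x == s)

-- number of maximal runs of s in l, given whether the previous cell was s
def rn (s : String) : List String → Bool → Nat
  | [], _ => 0
  | c :: t, p => (if c = s then (if p then 0 else 1) else 0) + rn s t (c == s)

theorem lineLoop_eq (s : String) :
    ∀ (l : List String) (prev : Option String) (cells runs : Int),
      lineLoop s l prev cells runs =
        (cells + (cnt s l : Nat), runs + (rn s l (prev == some s) : Nat)) := by
  intro l
  induction l with
  | nil =>
    intro prev cells runs
    simp [lineLoop, cnt, rn]
  | cons c t ih =>
    intro prev cells runs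
    rw [lineLoop]
    by_cases hc : c = s
    · rw [if_pos hc, ih]
      have h1 : cnt s (c :: t) = cnt s t + 1 := by
        simp [cnt, List.countP_cons, hc]
      have h2 : rn s (c :: t) (prev == some s) =
          (if (prev == some s) then 0 else 1) + rn s t (c == s) := by
        simp [rn, hc]
      have h3 : (some c == some s) = (c == s) := by simp
      rw [h1, h2, h3]
      by_cases hp : prev = some s
      · have hpt : (prev == some s) = true := by simp [hp]
        rw [hpt, if_neg (by simp [hp])]
        simp only [Prod.mk.injEq]
        refine ⟨by push_cast; ring, ?_⟩
        simp
      · have hpf : (prev == some s) = false := by simp [hp]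
        rw [hpf, if_pos hp]
        simp only [Prod.mk.injEq]
        refine ⟨by push_cast; ring, ?_⟩
        simp
        push_cast
        ring
    · rw [if_neg hc, ih]
      have h1 : cnt s (c :: t) = cnt s t := by
        simp [cnt, hc]
      have h2 : rn s (c :: t) (prev == some s) = rn s t (c == s) := by
        simp [rn, hc]
      have h3 : (some c == some s) = (c == s) := by simp
      rw [h1, h2, h3]

theorem zp_cons (s : String) (a : String) (l : List String) :
    zp s (a :: l) = (if a = s ∧ l.head? = some s then 1 else 0) + zp s l := by
  cases l with
  | nil => simp [zp]
  | cons b t =>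
    simp only [zp, List.tail_cons, List.zip_cons_cons, List.countP_cons, List.head?_cons]
    by_cases hab : a = s ∧ b = s
    · have hcond : a = s ∧ (some b : Option String) = some s := ⟨hab.1, by rw [hab.2]⟩
      rw [pairB_true hab, if_pos hcond, if_pos rfl]
      omega
    · have hcond : ¬(a = s ∧ (some b : Option String) = some s) := by
        intro hcon
        exact hab ⟨hcon.1, by injection hcon.2⟩
      rw [pairB_false hab, if_neg hcond, if_neg (by simp)]
      omega

theorem cnt_eq (s : String) :
    ∀ (l : List String) (p : Bool),
      cnt s l = rn s l p + zp s l + (if p = true ∧ l.head? = some s then 1 else 0) := by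
  intro l
  induction l with
  | nil => intro p; simp [cnt, rn, zp]
  | cons c t ih =>
    intro p
    rw [zp_cons]
    by_cases hc : c = s
    · have h1 : cnt s (c :: t) = cnt s t + 1 := by simp [cnt, hc]
      have h2 : rn s (c :: t) p = (if p then 0 else 1) + rn s t (c == s) := by simp [rn, hc]
      have hcs : (c == s) = true := by simp [hc]
      have hih := ih (c == s)
      rw [hcs] at hih
      rw [h1, h2, hih]
      by_cases hp : p = true <;> by_cases hts : t.head? = some s <;>
        (try simp [hp, hts, hc]) <;> omega
    · have h1 : cnt s (c :: t) = cnt s t := by simp [cnt, hc]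
      have h2 : rn s (c :: t) p = rn s t (c == s) := by simp [rn, hc]
      have hcs : (c == s) = false := by simp [hc]
      have hih := ih (c == s)
      rw [hcs] at hih
      rw [h1, h2, hcs, hih]
      by_cases hp : p = true <;> by_cases hts : t.head? = some s <;>
        (try simp [hp, hts, hc]) <;> omega

theorem linePairs_eq (l : List String) (s : String) : linePairs l s = ((zp s l : Nat) : Int) := by
  have h := lineLoop_eq s l none 0 0
  have hc := cnt_eq s l false
  rw [if_neg (by simp)] at hc
  unfold linePairs
  rw [h]
  simp only
  have hnone : ((none : Option String) == some s) = false := by simp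
  rw [hnone, hc]
  push_cast
  ring

-- sum of linePairs over a list of lines = cast of the Nat pair-count sum
theorem sum_linePairs (s : String) :
    ∀ (l : List (List String)),
      (l.map (fun r => linePairs r s)).sum = (((l.map (zp s)).sum : Nat) : Int) := by
  intro l
  induction l with
  | nil => simp
  | cons r t ih =>
    rw [List.map_cons, List.sum_cons, linePairs_eq, ih, List.map_cons, List.sum_cons,
      Nat.cast_add]

theorem hPairs_eq_sum (board : List (List String)) (s : String) :
    hPairs board s = (((board.map (zp s)).sum : Nat) : Int) := by
  rfl

-- List.range sum → Finset.range sum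
theorem range_sum_eq (f : Nat → Nat) :
    ∀ n, ((List.range n).map f).sum = ∑ j ∈ Finset.range n, f j := by
  intro n
  induction n with
  | zero => simp
  | succ m ih =>
    rw [List.range_succ, List.map_append, List.sum_append, Finset.sum_range_succ, ih]
    simp

-- the indicator sum over columns positions = pair count of the zipped rows
theorem ind_sum_eq (s : String) :
    ∀ (r1 r2 : List String) (n : Nat), r1.length ≤ n →
      (∑ j ∈ Finset.range n, (if r1[j]? = some s ∧ r2[j]? = some s then 1 else 0)) =
        (r1.zip r2).countP (pairB s) := by
  intro r1
  induction r1 with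
  | nil =>
    intro r2 n _
    have : ∀ j ∈ Finset.range n, (if ([] : List String)[j]? = some s ∧ r2[j]? = some s then 1 else 0) = 0 := by
      intro j _
      rw [if_neg (by simp)]
    rw [Finset.sum_congr rfl this]
    simp
  | cons a t1 ih =>
    intro r2 n hn
    cases r2 with
    | nil =>
      have : ∀ j ∈ Finset.range n, (if (a :: t1)[j]? = some s ∧ ([] : List String)[j]? = some s then 1 else 0) = 0 := by
        intro j _
        rw [if_neg (by simp)]
      rw [Finset.sum_congr rfl this]
      simp
    | cons b t2 =>
      cases n with
      | zero => simp at hn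
      | succ m =>
        rw [Finset.sum_range_succ']
        have hstep : ∀ j, (if (a :: t1)[j + 1]? = some s ∧ (b :: t2)[j + 1]? = some s then 1 else 0) =
            (if t1[j]? = some s ∧ t2[j]? = some s then 1 else 0) := by
          intro j
          simp [List.getElem?_cons_succ]
        have hsum : (∑ j ∈ Finset.range m, (if (a :: t1)[j + 1]? = some s ∧ (b :: t2)[j + 1]? = some s then 1 else 0)) =
            (t1.zip t2).countP (pairB s) := by
          rw [Finset.sum_congr rfl (fun j _ => hstep j)]
          exact ih t2 m (by simpa using hn)
        rw [hsum]
        have hf0 : (if (a :: t1)[0]? = some s ∧ (b :: t2)[0]? = some s then (1 : Nat) else 0) =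
            (if a = s ∧ b = s then (1 : Nat) else 0) := by
          simp
        rw [hf0]
        simp only [List.zip_cons_cons, List.countP_cons]
        by_cases hab : a = s ∧ b = s
        · rw [pairB_true hab, if_pos hab, if_pos rfl]
        · rw [pairB_false hab, if_neg hab, if_neg (by simp)]

theorem foldl_max_eq (l : List Nat) : ∀ a, l.foldl max a = max a (l.foldl max 0) := by
  induction l with
  | nil => intro a; simp
  | cons x t ih =>
    intro a
    simp only [List.foldl_cons]
    rw [ih (max a x), ih (max 0 x)]
    omega

theorem widthOf_cons (r : List String) (rest : List (List String)) :
    widthOf (r :: rest) = max r.length (widthOf rest) := by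
  simp only [widthOf, List.map_cons, List.foldl_cons]
  rw [foldl_max_eq]
  omega

theorem colj_cons (r : List String) (rest : List (List String)) (j : Nat) :
    colj (r :: rest) j = if h : j < r.length then r[j] :: colj rest j else colj rest j := by
  by_cases h : j < r.length
  · rw [dif_pos h]
    simp [colj, List.filterMap_cons, if_pos h, List.getElem?_eq_getElem h]
  · rw [dif_neg h]
    simp [colj, List.filterMap_cons, if_neg h]

-- the central column lemma: summed pair counts of the columns = vertical pair count
theorem col_sum_eq (s : String) :
    ∀ (board : List (List String)), vertSafe board s →
      ∀ n, widthOf board ≤ n →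
        (∑ j ∈ Finset.range n, zp s (colj board j)) =
          ((board.zip board.tail).map (fun p => (p.1.zip p.2).countP (pairB s))).sum := by
  intro board
  induction board with
  | nil =>
    intro _ n _
    have : ∀ j ∈ Finset.range n, zp s (colj [] j) = 0 := by
      intro j _
      simp [colj, zp]
    rw [Finset.sum_congr rfl this]
    simp
  | cons r1 rest ih =>
    intro hsafe n hn
    cases rest with
    | nil =>
      have : ∀ j ∈ Finset.range n, zp s (colj [r1] j) = 0 := by
        intro j _
        rw [colj_cons]
        by_cases h : j < r1.length
        · rw [dif_pos h]; simp [colj, zp]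
        · rw [dif_neg h]; simp [colj, zp]
      rw [Finset.sum_congr rfl this]
      simp
    | cons r2 rest' =>
      have hpair : ∀ x ∈ r1.drop r2.length, x ≠ s := hsafe (r1, r2) (by simp)
      have htail : vertSafe (r2 :: rest') s := by
        intro p hp
        exact hsafe p (by simp at hp ⊢; exact Or.inr hp)
      have hw := widthOf_cons r1 (r2 :: rest')
      have hr1n : r1.length ≤ n := by omega
      have hwt : widthOf (r2 :: rest') ≤ n := by omega
      -- pointwise decomposition of each column
      have hpt : ∀ j ∈ Finset.range n,
          zp s (colj (r1 :: r2 :: rest') j) =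
            (if r1[j]? = some s ∧ r2[j]? = some s then 1 else 0) + zp s (colj (r2 :: rest') j) := by
        intro j _
        rw [colj_cons]
        by_cases h : j < r1.length
        · rw [dif_pos h, zp_cons]
          by_cases h1 : r1[j] = s
          · -- symbol above: the next row must have a cell here
            have hj2 : j < r2.length := by
              by_contra hj2
              exact hpair r1[j] (by
                have : r1[j] = (r1.drop r2.length)[j - r2.length]'(by
                  rw [List.length_drop]; omega) := by
                  rw [List.getElem_drop]
                  congr 1
                  omega
                rw [this]
                exact List.getElem_mem _) h1
            have hcol2 : colj (r2 :: rest') j = r2[j] :: colj rest' j := by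
              rw [colj_cons, dif_pos hj2]
            rw [hcol2]
            simp only [List.head?_cons]
            by_cases h2 : r2[j] = s
            · rw [if_pos ⟨h1, by rw [h2]⟩,
                if_pos ⟨by rw [List.getElem?_eq_getElem h, h1], by rw [List.getElem?_eq_getElem hj2, h2]⟩]
            · rw [if_neg (by intro hcon; exact h2 (by injection hcon.2)),
                if_neg (by
                  intro hcon
                  rw [List.getElem?_eq_getElem hj2] at hcon
                  exact h2 (by injection hcon.2))]
          · rw [if_neg (by intro hcon; exact h1 hcon.1),
              if_neg (by
                intro hcon
                rw [List.getElem?_eq_getElem h] at hcon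
                exact h1 (by injection hcon.1))]
        · have hnone : r1[j]? = none := List.getElem?_eq_none (by omega)
          rw [dif_neg h, if_neg (by simp [hnone]), Nat.zero_add]
      rw [Finset.sum_congr rfl hpt, Finset.sum_add_distrib,
        ind_sum_eq s r1 r2 n hr1n, ih htail n hwt]
      simp

-- B's column score = A's vertical pair count (both as Int), under vertSafe
theorem colScore_eq (board : List (List String)) (s : String) (hsafe : vertSafe board s) :
    ((colsOf board).map (fun c => linePairs c s)).sum = vPairs board s := by
  rw [sum_linePairs]
  unfold colsOf
  rw [List.map_map]
  have h1 : ((List.range (widthOf board)).map (zp s ∘ colj board)).sum =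
      ∑ j ∈ Finset.range (widthOf board), zp s (colj board j) := by
    exact range_sum_eq (fun j => zp s (colj board j)) (widthOf board)
  rw [h1, col_sum_eq s board hsafe (widthOf board) (le_refl _)]
  rfl

-- ===== VERDICT (by name: the statement is the Claim_ definition above) =====
set_option maxHeartbeats 1000000 in
theorem checking_win_lose_spec : Claim_equal_checking_win_lose := by
  intro board1 board2 k _ hpre
  unfold Spec_checking_win_lose
  obtain ⟨hp1, hp2⟩ := hpre
  unfold checking_win_lose checking_win_lose_alt winsB
  rw [hScan_eq, hScan_eq, vScan_eq "X" k board1 1 hp1, vScan_eq "O" k board2 1 hp2,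
    colScore_eq board1 "X" hp1, colScore_eq board2 "O" hp2,
    sum_linePairs "X" board1, sum_linePairs "O" board2,
    ← hPairs_eq_sum board1 "X", ← hPairs_eq_sum board2 "O"]
  have hh1 := hPairs_nonneg board1 "X"
  have hv1 := vPairs_nonneg board1 "X"
  have hh2 := hPairs_nonneg board2 "O"
  have hv2 := vPairs_nonneg board2 "O"
  simp only [Bool.and_eq_true, Bool.or_eq_true, decide_eq_true_eq, ge_iff_le]
  by_cases c1 : 1 < k ∧ k ≤ 1 + hPairs board1 "X" <;>
    by_cases c2 : 1 < k ∧ k ≤ 1 + vPairs board1 "X" <;>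
      by_cases c3 : 1 < k ∧ k ≤ 1 + hPairs board2 "O" <;>
        by_cases c4 : 1 < k ∧ k ≤ 1 + vPairs board2 "O" <;>
          simp [c1, c2, c3, c4] <;>
            split_ifs <;> first | rfl | omega
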